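-- pv_equiv track=rewrite | github.com/justindomke/pangolin | pangolin/interface.py | get_sliced_shapes
-- ===== SOURCE A (Python) =====
-- def split_shape(shape, i):
--     if i is None:
--         new_shape = shape
--         new_axis_size = None
--     else:
--         lo, mid, hi = (shape[:i], shape[i], shape[i + 1 :])
--         new_shape = lo + hi
--         new_axis_size = shape[i]
--     return new_shape, new_axis_size
--
-- def get_sliced_shapes(shapes, in_axes, axis_size):
--     axis_size = axis_size
--     remaining_shapes = []
--     for i, shape in zip(in_axes, shapes):
--         new_shape, new_axis_size = split_shape(shape, i)
--         remaining_shapes.append(new_shape)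
--         if axis_size is None:
--             axis_size = new_axis_size
--         elif new_axis_size is not None:
--             assert axis_size == new_axis_size, "incoherent axis size"
--     return remaining_shapes, axis_size
-- ===== SOURCE B (Python) =====
-- def get_sliced_shapes(shapes, in_axes, axis_size):
--     if not shapes or not in_axes:
--         return [], axis_size
--     i, s = in_axes[0], shapes[0]
--     if i is None:
--         rest, ax = get_sliced_shapes(shapes[1:], in_axes[1:], axis_size)
--         return [s] + rest, ax
--     cand = s[i]
--     assert axis_size is None or axis_size == cand, "incoherent axis size"
--     j = i % len(s)
--     rest, ax = get_sliced_shapes(shapes[1:], in_axes[1:], cand)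
--     return [[x for k, x in enumerate(s) if k != j]] + rest, ax
-- ===== Notes on version B (the rewrite author's own statement) =====
-- stated objective: alternative
-- what changed: Replaces A's accumulator loop (append-to-list plus a running axis-size comparison) by a direct recursion on the two lists that asserts coherence against the incoming size, threads the new candidate size down the recursion, and removes the mapped axis via an enumerate filter on the normalized index instead of slice concatenation.
-- intended difference: On inputs where some zipped in_axes entry is -1, A returns shape[:-1] + shape for that shape (shape[i+1:] with i+1 == 0 is the whole shape, so the mapped axis is duplicated instead of removed), while B removes the normalized last axis, which is the intended split. — e.g. on get_sliced_shapes([[5]], [some (-1)], none): A returns ([[5]], some 5), B returns ([[]], some 5)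
import Mathlib
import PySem

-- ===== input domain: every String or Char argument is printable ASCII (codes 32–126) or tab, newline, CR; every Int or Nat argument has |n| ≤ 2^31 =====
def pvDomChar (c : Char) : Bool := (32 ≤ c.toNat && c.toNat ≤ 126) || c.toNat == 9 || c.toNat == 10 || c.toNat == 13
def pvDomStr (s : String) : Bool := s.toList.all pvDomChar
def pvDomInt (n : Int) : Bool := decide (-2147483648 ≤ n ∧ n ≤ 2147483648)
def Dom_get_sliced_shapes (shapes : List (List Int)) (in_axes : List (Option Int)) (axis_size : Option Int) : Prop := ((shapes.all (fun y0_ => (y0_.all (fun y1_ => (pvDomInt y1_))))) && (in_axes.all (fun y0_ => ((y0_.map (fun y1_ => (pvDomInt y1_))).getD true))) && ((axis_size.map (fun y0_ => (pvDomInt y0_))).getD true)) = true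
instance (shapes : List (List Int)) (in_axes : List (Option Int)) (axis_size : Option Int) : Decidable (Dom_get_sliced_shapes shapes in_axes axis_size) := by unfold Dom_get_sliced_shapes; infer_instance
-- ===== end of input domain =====

-- B is a recursive assert-then-thread reimplementation (axis removed via a normalized-index
-- enumerate filter); on inputs where some mapped axis is -1 it intentionally differs from A
-- (see D_ below): A fails to remove that axis, B removes it.

-- ===== PORT A =====
def split_shape (shape : List Int) (i : Option Int) : List Int × Option Int :=
  match i with
  | none => (shape, none)
  | some j =>
      (PySem.List.slice shape none (some j) ++ PySem.List.slice shape (some (j + 1)) none,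
       some ((PySem.List.pyGet? shape j).getD 0))   -- Pre_ keeps j in range, so getD is never used

def get_sliced_shapes (shapes : List (List Int)) (in_axes : List (Option Int)) (axis_size : Option Int) : List (List Int) × Option Int :=
  (in_axes.zip shapes).foldl
    (fun st p =>
      let ns := split_shape p.2 p.1
      (st.1 ++ [ns.1],
       match st.2 with
       | none => ns.2
       | some a => some a))   -- assert branch: under Pre_ the compared sizes are equal, so the value stays a
    ([], axis_size)

-- ===== PORT B =====
def get_sliced_shapes_alt (shapes : List (List Int)) (in_axes : List (Option Int)) (axis_size : Option Int) : List (List Int) × Option Int :=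
  match shapes, in_axes with
  | [], _ => ([], axis_size)
  | _, [] => ([], axis_size)
  | s :: rest_s, i :: rest_i =>
    match i with
    | none =>
        let r := get_sliced_shapes_alt rest_s rest_i axis_size
        (s :: r.1, r.2)
    | some iv =>
        let cand := (PySem.List.pyGet? s iv).getD 0   -- Pre_ keeps iv in range
        -- assert axis_size is None or axis_size == cand: under Pre_ it holds
        let j := PySem.Int.mod iv (s.length : Int)    -- i % len(s); len(s) > 0 under Pre_
        let r := get_sliced_shapes_alt rest_s rest_i (some cand)
        (((PySem.List.enumerate s 0).filterMap
            (fun q => if q.1 ≠ j then some q.2 else none)) :: r.1, r.2)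

-- ===== PRECONDITION & SPEC =====
-- candidate axis sizes: the given axis_size plus shape[i] for every non-None axis (used only by Pre_)
def pvCands_get_sliced_shapes (shapes : List (List Int)) (in_axes : List (Option Int)) (axis_size : Option Int) : List Int :=
  axis_size.toList ++ (in_axes.zip shapes).filterMap (fun p => p.1.map (fun j => (PySem.List.pyGet? p.2 j).getD 0))

-- Pre_ excludes exactly the inputs where Python A raises: an out-of-range axis index (IndexError)
-- or two distinct candidate axis sizes (AssertionError "incoherent axis size").
def Pre_get_sliced_shapes (shapes : List (List Int)) (in_axes : List (Option Int)) (axis_size : Option Int) : Prop :=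
  (∀ p ∈ in_axes.zip shapes, ∀ j, p.1 = some j → PySem.Raise.InRange p.2.length j) ∧
  (∀ a ∈ pvCands_get_sliced_shapes shapes in_axes axis_size,
     ∀ b ∈ pvCands_get_sliced_shapes shapes in_axes axis_size, a = b)
instance (shapes : List (List Int)) (in_axes : List (Option Int)) (axis_size : Option Int) : Decidable (Pre_get_sliced_shapes shapes in_axes axis_size) := by unfold Pre_get_sliced_shapes; infer_instance

def pvWitness_get_sliced_shapes : List (List Int) × List (Option Int) × Option Int :=
  ([[2, 3], [3, 4]], [some 1, some 0], none)

-- On inputs where some zipped axis index equals -1, A returns shape[:-1] + shape (the axis is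
-- duplicated, not removed, because shape[i+1:] with i+1 == 0 is the whole shape), while B removes
-- the mapped axis as intended for a shape-splitting function.
def D_get_sliced_shapes (shapes : List (List Int)) (in_axes : List (Option Int)) (axis_size : Option Int) : Prop :=
  ∃ p ∈ in_axes.zip shapes, p.1 = some (-1)
instance (shapes : List (List Int)) (in_axes : List (Option Int)) (axis_size : Option Int) : Decidable (D_get_sliced_shapes shapes in_axes axis_size) := by unfold D_get_sliced_shapes; infer_instance

def Spec_get_sliced_shapes (shapes : List (List Int)) (in_axes : List (Option Int)) (axis_size : Option Int) (out : List (List Int) × Option Int) : Prop := ¬ D_get_sliced_shapes shapes in_axes axis_size → out = get_sliced_shapes_alt shapes in_axes axis_size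
instance (shapes : List (List Int)) (in_axes : List (Option Int)) (axis_size : Option Int) (out : List (List Int) × Option Int) : Decidable (Spec_get_sliced_shapes shapes in_axes axis_size out) := by unfold Spec_get_sliced_shapes; infer_instance

def pvDiffWitness_get_sliced_shapes : List (List Int) × List (Option Int) × Option Int :=
  ([[5]], [some (-1)], none)
def pvDiffWitnessOut_get_sliced_shapes : (List (List Int) × Option Int) × (List (List Int) × Option Int) :=
  (([[5]], some 5), ([[]], some 5))

-- ===== CLAIM (what is proved, stated in full; the proofs are below) =====
def Claim_unchanged_get_sliced_shapes : Prop := ∀ (shapes : List (List Int)) (in_axes : List (Option Int)) (axis_size : Option Int), Dom_get_sliced_shapes shapes in_axes axis_size → Pre_get_sliced_shapes shapes in_axes axis_size → Spec_get_sliced_shapes shapes in_axes axis_size (get_sliced_shapes shapes in_axes axis_size)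
def Claim_changed_get_sliced_shapes : Prop := Dom_get_sliced_shapes (pvDiffWitness_get_sliced_shapes.1) (pvDiffWitness_get_sliced_shapes.2.1) (pvDiffWitness_get_sliced_shapes.2.2) ∧ Pre_get_sliced_shapes (pvDiffWitness_get_sliced_shapes.1) (pvDiffWitness_get_sliced_shapes.2.1) (pvDiffWitness_get_sliced_shapes.2.2) ∧ D_get_sliced_shapes (pvDiffWitness_get_sliced_shapes.1) (pvDiffWitness_get_sliced_shapes.2.1) (pvDiffWitness_get_sliced_shapes.2.2) ∧ get_sliced_shapes (pvDiffWitness_get_sliced_shapes.1) (pvDiffWitness_get_sliced_shapes.2.1) (pvDiffWitness_get_sliced_shapes.2.2) = pvDiffWitnessOut_get_sliced_shapes.1 ∧ get_sliced_shapes_alt (pvDiffWitness_get_sliced_shapes.1) (pvDiffWitness_get_sliced_shapes.2.1) (pvDiffWitness_get_sliced_shapes.2.2) = pvDiffWitnessOut_get_sliced_shapes.2 ∧ pvDiffWitnessOut_get_sliced_shapes.1 ≠ pvDiffWitnessOut_get_sliced_shapes.2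
def Claim_exact_get_sliced_shapes : Prop := ∀ (shapes : List (List Int)) (in_axes : List (Option Int)) (axis_size : Option Int), Dom_get_sliced_shapes shapes in_axes axis_size → Pre_get_sliced_shapes shapes in_axes axis_size → D_get_sliced_shapes shapes in_axes axis_size → get_sliced_shapes shapes in_axes axis_size ≠ get_sliced_shapes_alt shapes in_axes axis_size

-- ===== LEMMAS AND PROOFS =====

-- the split applied by A to each (axis, shape) pair (first component only)
def pvSplitA (p : Option Int × List Int) : List Int :=
  match p.1 with
  | none => p.2
  | some j => PySem.List.slice p.2 none (some j) ++ PySem.List.slice p.2 (some (j + 1)) none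

-- the split applied by B to each (axis, shape) pair
def pvSplitB (p : Option Int × List Int) : List Int :=
  match p.1 with
  | none => p.2
  | some j => (PySem.List.enumerate p.2 0).filterMap
      (fun q => if q.1 ≠ PySem.Int.mod j (p.2.length : Int) then some q.2 else none)

-- the non-None candidate axis sizes of a zipped list
def pvCandsZ (l : List (Option Int × List Int)) : List Int :=
  l.filterMap (fun p => p.1.map (fun j => (PySem.List.pyGet? p.2 j).getD 0))

-- A's fold accumulates the split shapes and keeps the first non-None axis size.
theorem foldA_eq (l : List (Option Int × List Int)) (acc : List (List Int)) (ax : Option Int) :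
    l.foldl
      (fun st p =>
        let ns := split_shape p.2 p.1
        (st.1 ++ [ns.1],
         match st.2 with
         | none => ns.2
         | some a => some a))
      (acc, ax)
    = (acc ++ l.map pvSplitA, ax.or ((pvCandsZ l).head?)) := by
  induction l generalizing acc ax with
  | nil => simp [pvCandsZ]
  | cons p t ih =>
      rw [List.foldl_cons, ih]
      cases hp : p.1 with
      | none => cases ax <;> simp [split_shape, pvSplitA, pvCandsZ, hp]
      | some j => cases ax <;> simp [split_shape, pvSplitA, pvCandsZ, hp, Option.or]

-- B's recursion maps the split over the zip and returns the last candidate (else the given size).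
theorem altB_eq (shapes : List (List Int)) (in_axes : List (Option Int)) (ax : Option Int) :
    get_sliced_shapes_alt shapes in_axes ax
      = ((in_axes.zip shapes).map pvSplitB,
         ((pvCandsZ (in_axes.zip shapes)).getLast?).or ax) := by
  induction shapes generalizing in_axes ax with
  | nil => cases in_axes <;> simp [get_sliced_shapes_alt, pvCandsZ]
  | cons s ss ih =>
      cases in_axes with
      | nil => simp [get_sliced_shapes_alt, pvCandsZ]
      | cons i is =>
          cases i with
          | none =>
              simp only [get_sliced_shapes_alt, ih]
              simp [pvSplitB, pvCandsZ]
          | some iv =>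
              simp only [get_sliced_shapes_alt, ih]
              simp [pvSplitB, pvCandsZ, List.getLast?_cons]

-- dropping one enumerated index from an enumeration is take ++ drop (general start)
theorem enumFilter_gen (s : List Int) (a t : Int) :
    (PySem.List.enumerate s a).filterMap (fun q => if q.1 ≠ t then some q.2 else none)
      = if t < a then s else s.take (t - a).toNat ++ s.drop ((t - a).toNat + 1) := by
  induction s generalizing a with
  | nil =>
      rw [PySem.List.enumerate_nil]
      split <;> simp
  | cons x xs ih =>
      rw [PySem.List.enumerate_cons, List.filterMap_cons]
      by_cases h : a = t
      · subst h
        simp only [ne_eq, not_true_eq_false, if_false]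
        rw [ih (a + 1), if_pos (by omega), if_neg (by omega)]
        simp
      · simp only [ne_eq, h, not_false_eq_true, if_true]
        rw [ih (a + 1)]
        by_cases hlt : t < a
        · rw [if_pos (by omega), if_pos hlt]
        · rw [if_neg (by omega), if_neg hlt]
          have h1 : (t - a).toNat = (t - (a + 1)).toNat + 1 := by omega
          rw [h1]
          simp

-- Int form used by the ports: 0 ≤ t drops index t.toNat
theorem enumFilter_int (s : List Int) (t : Int) (ht : 0 ≤ t) :
    (PySem.List.enumerate s 0).filterMap (fun q => if q.1 ≠ t then some q.2 else none)
      = s.take t.toNat ++ s.drop (t.toNat + 1) := by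
  rw [enumFilter_gen s 0 t, if_neg (by omega)]
  simp

-- Python j % n for -n ≤ j < 0 (positive n) is j + n
theorem pvEmodNeg (j n : Int) (h1 : -n ≤ j) (h2 : j < 0) : j % n = j + n := by
  have h3 : j % n = (j + n) % n := by
    conv_lhs => rw [show j = (j + n) + (-1) * n by ring]
    exact Int.add_mul_emod_self_right (j + n) (-1) n
  rw [h3, Int.emod_eq_of_lt (by omega) (by omega)]

-- the two splits agree on every zipped pair whose axis is in range and not -1
theorem split_agree (p : Option Int × List Int)
    (hr : ∀ j, p.1 = some j → PySem.Raise.InRange p.2.length j)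
    (hne : p.1 ≠ some (-1)) : pvSplitA p = pvSplitB p := by
  obtain ⟨i, s⟩ := p
  cases i with
  | none => rfl
  | some j =>
      have hrange : PySem.Raise.InRange s.length j := hr j rfl
      have hj : -(s.length : Int) ≤ j ∧ j < (s.length : Int) := by
        simpa [PySem.Raise.InRange] using hrange
      have hpos : 0 < (s.length : Int) := by omega
      have hmod : PySem.Int.mod j (s.length : Int) = j % (s.length : Int) :=
        PySem.Int.mod_eq_emod_of_pos hpos
      simp only [pvSplitA, pvSplitB, hmod]
      by_cases hj0 : 0 ≤ j
      · -- nonnegative axis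
        have hm : j % (s.length : Int) = j := Int.emod_eq_of_lt hj0 hj.2
        rw [hm, enumFilter_int s j hj0,
            PySem.List.slice_to s hj0, PySem.List.slice_from s (by omega : (0:Int) ≤ j + 1)]
        have : (j + 1).toNat = j.toNat + 1 := by omega
        rw [this]
      · -- negative axis, j ≤ -2 since j ≠ -1
        have hne' : j ≠ -1 := fun h => hne (by rw [h])
        have hj2 : j ≤ -2 := by omega
        have hm : j % (s.length : Int) = j + s.length :=
          pvEmodNeg j (s.length : Int) hj.1 (by omega)
        have hmn : 0 ≤ j + (s.length : Int) := by omega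
        rw [hm, enumFilter_int s _ hmn]
        -- slices with negative bounds
        obtain ⟨k, hk⟩ : ∃ k : Nat, j = -(k : Int) := ⟨(-j).toNat, by omega⟩
        subst hk
        have hk2 : 2 ≤ k := by omega
        have hkn : k ≤ s.length := by omega
        rw [PySem.List.slice_to_neg_natCast s k (by omega)]
        have : (-(k : Int) + 1) = -(((k - 1 : Nat)) : Int) := by omega
        rw [this, PySem.List.slice_from_neg_natCast s (k - 1) (by omega)]
        have h1 : (-(k : Int) + (s.length : Int)).toNat = s.length - k := by omega
        have h2 : s.length - (k - 1) = s.length - k + 1 := by omega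
        rw [h1, h2]

-- under coherence, first-candidate-or-given equals last-candidate-or-given
theorem axis_agree (l : List (Option Int × List Int)) (ax : Option Int)
    (heq : ∀ a ∈ ax.toList ++ pvCandsZ l, ∀ b ∈ ax.toList ++ pvCandsZ l, a = b) :
    ax.or ((pvCandsZ l).head?) = ((pvCandsZ l).getLast?).or ax := by
  cases hc : pvCandsZ l with
  | nil => cases ax <;> simp
  | cons c t =>
      have hhead : c ∈ ax.toList ++ pvCandsZ l := by simp [hc]
      cases hl : (c :: t).getLast? with
      | none => simp at hl
      | some d =>
          have hd : d ∈ ax.toList ++ pvCandsZ l := by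
            rw [hc]; exact List.mem_append_right _ (List.mem_of_getLast? hl)
          cases ax with
          | none => simpa using congrArg some (heq c hhead d hd)
          | some a =>
              have ha : a ∈ (some a : Option Int).toList ++ pvCandsZ l := by simp
              simpa using congrArg some (heq d hd a ha).symm

-- ===== VERDICT (by name: the statement is the Claim_ definition above) =====
theorem get_sliced_shapes_spec : Claim_unchanged_get_sliced_shapes := by
  intro shapes in_axes axis_size _ hpre hnD
  obtain ⟨hin, heq⟩ := hpre
  unfold get_sliced_shapes
  rw [foldA_eq, altB_eq]
  refine Prod.ext ?_ ?_
  · simp only [List.nil_append]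
    apply List.map_congr_left
    intro p hp
    refine split_agree p (hin p hp) ?_
    intro hp1
    exact hnD ⟨p, hp, hp1⟩
  · exact axis_agree _ _ (by
      intro a ha b hb
      exact heq a (by simpa [pvCands_get_sliced_shapes, pvCandsZ] using ha)
               b (by simpa [pvCands_get_sliced_shapes, pvCandsZ] using hb))

theorem get_sliced_shapes_changed : Claim_changed_get_sliced_shapes := by
  unfold Claim_changed_get_sliced_shapes; decide

theorem get_sliced_shapes_tight : Claim_exact_get_sliced_shapes := by
  intro shapes in_axes axis_size _ hpre hD heqAB
  obtain ⟨hin, _⟩ := hpre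
  obtain ⟨p, hp, hp1⟩ := hD
  have h1 := congrArg Prod.fst heqAB
  rw [show get_sliced_shapes shapes in_axes axis_size
        = (in_axes.zip shapes).foldl _ ([], axis_size) from rfl] at h1
  rw [foldA_eq, altB_eq] at h1
  simp only [List.nil_append] at h1
  have h2 : pvSplitA p = pvSplitB p := by
    have := (List.map_inj_left).mp h1 p hp
    exact this
  -- at axis -1 the two splits have different lengths
  have hrange : PySem.Raise.InRange p.2.length (-1) := hin p hp (-1) hp1
  have hlen : 1 ≤ p.2.length := by
    have : -(p.2.length : Int) ≤ -1 ∧ (-1 : Int) < (p.2.length : Int) := by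
      simpa [PySem.Raise.InRange] using hrange
    omega
  have hA : (pvSplitA p).length = (p.2.length - 1) + p.2.length := by
    simp only [pvSplitA, hp1]
    rw [PySem.List.slice_to_neg_one]
    have : (-1 : Int) + 1 = ((0 : Nat) : Int) := by norm_num
    rw [this, PySem.List.slice_from_natCast]
    simp
  have hB : (pvSplitB p).length = p.2.length - 1 := by
    simp only [pvSplitB, hp1]
    have hpos : 0 < (p.2.length : Int) := by omega
    have hmod : PySem.Int.mod (-1) (p.2.length : Int) = (p.2.length : Int) - 1 := by
      rw [PySem.Int.mod_eq_emod_of_pos hpos, pvEmodNeg (-1) _ (by omega) (by omega)]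
      ring
    rw [hmod, enumFilter_int p.2 _ (by omega)]
    have ht : ((p.2.length : Int) - 1).toNat = p.2.length - 1 := by omega
    rw [ht]
    simp
    omega
  rw [h2] at hA
  omega
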